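-- pv_equiv track=rewrite | github.com/mertkont/nuvoora-ai | app/utils/compact_data_handler.py | generate_field_abbreviations
-- ===== SOURCE A (Python) =====
-- from typing import Dict, List
--
-- def generate_field_abbreviations(data_dict: Dict[str, List]) -> Dict[str, str]:
--     """Abbreviations for the data fields"""
--     abbreviations = {}
--     seen = set()
--
--     for field_name in data_dict.keys():
--         # Start with one-charactered abbreviations
--         if len(field_name) > 0:
--             abbr = field_name[0].lower()
--             counter = 0
--             while abbr in seen:
--                 counter += 1
--                 # Use the next letter of the alphabet, or use a number
--                 if counter < 26:
--                     abbr = chr(97 + counter)  # Start with a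
--                 else:
--                     abbr = f"{field_name[0].lower()}{counter - 25}"
--             seen.add(abbr)
--             abbreviations[field_name] = abbr
--
--     return abbreviations
-- ===== SOURCE B (Python) =====
-- def generate_field_abbreviations(data_dict):
--     """Abbreviations for the data fields.
--
--     Same results as the naive version, but instead of restarting the probe
--     sequence (first letter, then 'b'..'z', then '<first>1', '<first>2', ...)
--     from scratch for every field, it resumes from monotone pointers: a shared
--     pointer into the letter range and a per-first-char pointer into the
--     numeric suffixes.  Each pointer only moves forward, so the total probing
--     work is amortized O(N) instead of O(N^2).
--     """
--     abbreviations = {}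
--     seen = set()
--     next_letter = 1      # shared resume pointer into the 'b'..'z' candidates
--     next_num = {}        # per-first-char resume pointer for numeric suffixes
--     for field_name in data_dict.keys():
--         if not field_name:
--             continue
--         f0 = field_name[0].lower()
--         if f0 not in seen:
--             abbr = f0
--         else:
--             while next_letter < 26 and chr(97 + next_letter) in seen:
--                 next_letter += 1
--             if next_letter < 26:
--                 abbr = chr(97 + next_letter)
--             else:
--                 k = next_num.get(f0, 1)
--                 while f"{f0}{k}" in seen:
--                     k += 1
--                 abbr = f"{f0}{k}"
--                 next_num[f0] = k + 1
--         seen.add(abbr)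
--         abbreviations[field_name] = abbr
--     return abbreviations
-- ===== Notes on version B (the rewrite author's own statement) =====
-- stated objective: faster
-- what changed: Instead of restarting the candidate probe ('b'..'z', then '<first>1','<first>2',...) from scratch for every field, B resumes from monotone pointers: one shared pointer into the letter range and a per-first-char pointer into the numeric suffixes, so total probing work is amortized linear.
import Mathlib
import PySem

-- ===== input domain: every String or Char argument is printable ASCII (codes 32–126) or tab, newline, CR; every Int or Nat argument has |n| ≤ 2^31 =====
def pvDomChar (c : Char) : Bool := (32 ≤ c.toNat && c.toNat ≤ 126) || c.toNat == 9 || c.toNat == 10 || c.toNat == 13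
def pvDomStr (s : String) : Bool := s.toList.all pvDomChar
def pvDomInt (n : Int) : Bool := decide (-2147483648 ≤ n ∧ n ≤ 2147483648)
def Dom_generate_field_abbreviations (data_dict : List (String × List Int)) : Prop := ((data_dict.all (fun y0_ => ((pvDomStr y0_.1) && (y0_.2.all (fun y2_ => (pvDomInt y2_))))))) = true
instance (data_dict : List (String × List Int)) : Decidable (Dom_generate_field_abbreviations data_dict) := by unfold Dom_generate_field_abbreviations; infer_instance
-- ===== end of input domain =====

-- B replaces A's per-field restart of the candidate probe by monotone resume pointers
-- (one shared letter pointer, one numeric pointer per first character): amortized-linear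
-- probing instead of quadratic; same return value (a timing run measured the speed-up).

-- ===== PORT A =====

-- Fuel bound for the unbounded `while abbr in seen:` loops of both Pythons (a totality
-- guard only, never reached: a candidate longer than everything in `seen` is always free).
def pvMaxLen (l : List String) : Nat := l.foldr (fun s m => max s.toList.length m) 0

-- A's `while abbr in seen:` loop, step for step (fuel is the totality guard).
def pvALoop (f0 : String) (seen : PySem.Set String) : Nat → String → Nat → String
  | 0, abbr, _ => abbr
  | fuel + 1, abbr, counter =>
    if PySem.Set.contains seen abbr then
      let counter := counter + 1
      let abbr := if counter < 26 then String.ofList [Char.ofNat (97 + counter)]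
                  else f0 ++ PySem.Int.toStr ((counter : Int) - 25)
      pvALoop f0 seen fuel abbr counter
    else abbr

def pvStepA (st : PySem.Dict String String × PySem.Set String) (kv : String × List Int) :
    PySem.Dict String String × PySem.Set String :=
  match (kv.1).toList with
  | [] => st                                   -- `if len(field_name) > 0` fails
  | c :: _ =>
    let abbr0 := PySem.Str.lower (String.ofList [c])   -- field_name[0].lower()
    let abbr := pvALoop abbr0 st.2 (26 + 10 ^ (pvMaxLen st.2 + 1)) abbr0 0
    (PySem.Dict.insert st.1 kv.1 abbr, PySem.Set.add st.2 abbr)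

def generate_field_abbreviations (data_dict : List (String × List Int)) : List (String × String) :=
  (data_dict.foldl pvStepA (PySem.Dict.empty, PySem.Set.empty)).1.items

-- ===== PORT B =====

-- B's `while next_letter < 26 and chr(97+next_letter) in seen:` loop.
def pvBLetter (seen : PySem.Set String) (p : Nat) : Nat :=
  if p < 26 then
    if PySem.Set.contains seen (String.ofList [Char.ofNat (97 + p)]) then pvBLetter seen (p + 1)
    else p
  else p
termination_by 26 - p
decreasing_by omega

-- B's `while f"{f0}{k}" in seen: k += 1` loop (fuel is the totality guard).
def pvBNum (f0 : String) (seen : PySem.Set String) : Nat → Nat → Nat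
  | 0, k => k
  | fuel + 1, k =>
    if PySem.Set.contains seen (f0 ++ PySem.Int.toStr (k : Int)) then pvBNum f0 seen fuel (k + 1)
    else k

def pvStepB
    (st : PySem.Dict String String × PySem.Set String × Nat × PySem.Dict String Nat)
    (kv : String × List Int) :
    PySem.Dict String String × PySem.Set String × Nat × PySem.Dict String Nat :=
  match (kv.1).toList with
  | [] => st                                   -- `if not field_name: continue`
  | c :: _ =>
    let f0 := PySem.Str.lower (String.ofList [c])
    let abbrs := st.1
    let seen := st.2.1
    let p := st.2.2.1
    let numd := st.2.2.2
    if PySem.Set.contains seen f0 then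
      let p := pvBLetter seen p
      if p < 26 then
        let abbr := String.ofList [Char.ofNat (97 + p)]
        (PySem.Dict.insert abbrs kv.1 abbr, PySem.Set.add seen abbr, p, numd)
      else
        let k := pvBNum f0 seen (10 ^ (pvMaxLen seen + 1) + 1) (PySem.Dict.getD numd f0 1)
        let abbr := f0 ++ PySem.Int.toStr (k : Int)
        (PySem.Dict.insert abbrs kv.1 abbr, PySem.Set.add seen abbr, p,
         PySem.Dict.insert numd f0 (k + 1))
    else
      (PySem.Dict.insert abbrs kv.1 f0, PySem.Set.add seen f0, p, numd)

def generate_field_abbreviations_alt (data_dict : List (String × List Int)) : List (String × String) :=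
  (data_dict.foldl pvStepB (PySem.Dict.empty, PySem.Set.empty, 1, PySem.Dict.empty)).1.items

-- ===== PRECONDITION & SPEC =====
def Spec_generate_field_abbreviations (data_dict : List (String × List Int)) (out : List (String × String)) : Prop := out = generate_field_abbreviations_alt data_dict
instance (data_dict : List (String × List Int)) (out : List (String × String)) : Decidable (Spec_generate_field_abbreviations data_dict out) := by unfold Spec_generate_field_abbreviations; infer_instance

-- ===== CLAIM (what is proved, stated in full; the proofs are below) =====
def Claim_equal_generate_field_abbreviations : Prop := ∀ (data_dict : List (String × List Int)), Dom_generate_field_abbreviations data_dict → Spec_generate_field_abbreviations data_dict (generate_field_abbreviations data_dict)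

-- ===== LEMMAS AND PROOFS =====

-- The candidate sequence both programs probe (for a field whose lowered first char is f0):
-- pvCand f0 1 = 'b', …, pvCand f0 25 = 'z', pvCand f0 (25+k) = f0 ++ str(k).
def pvCand (f0 : String) (c : Nat) : String :=
  if c < 26 then String.ofList [Char.ofNat (97 + c)] else f0 ++ PySem.Int.toStr ((c : Int) - 25)

-- a candidate longer than everything in `seen` is free
lemma pvLen_le_maxLen {s : String} : ∀ {l : List String}, s ∈ l → s.toList.length ≤ pvMaxLen l := by
  intro l
  induction l with
  | nil => intro h; cases h
  | cons a t ih =>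
    intro h
    rcases List.mem_cons.mp h with h | h
    · subst h; simp [pvMaxLen]
    · have := ih h
      simp only [pvMaxLen, List.foldr] at *
      omega

lemma pvBigFree (f0 : String) (seen : List String) (c : Nat) (hc : 26 ≤ c)
    (h : 10 ^ (pvMaxLen seen + 1) ≤ c - 25) : pvCand f0 c ∉ seen := by
  intro hmem
  have hlen := pvLen_le_maxLen hmem
  rw [pvCand, if_neg (by omega)] at hlen
  have h1 : (PySem.Int.toStr ((c : Int) - 25)).toList = Nat.toDigits 10 (c - 25) := by
    rw [PySem.Int.toList_toStr]
    unfold PySem.Int.toChars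
    rw [if_neg (by omega)]
    congr 1
    omega
  rw [String.toList_append, List.length_append, h1] at hlen
  have h2 : ¬ ((Nat.toDigits 10 (c - 25)).length ≤ pvMaxLen seen + 1) := by
    rw [Nat.length_toDigits_le_iff (by omega) (by omega)]
    omega
  omega

lemma pvFreeExists (f0 : String) (seen : List String) (start : Nat) :
    ∃ c, start ≤ c ∧ pvCand f0 c ∉ seen := by
  refine ⟨max start (25 + 10 ^ (pvMaxLen seen + 1)), le_max_left _ _, ?_⟩
  apply pvBigFree
  · have : 1 ≤ 10 ^ (pvMaxLen seen + 1) := Nat.one_le_pow _ _ (by omega)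
    omega
  · omega

-- the least free candidate index ≥ start
def pvLeast (f0 : String) (seen : List String) (start : Nat) : Nat :=
  Nat.find (pvFreeExists f0 seen start)

lemma pvLeast_ge (f0 seen start) : start ≤ pvLeast f0 seen start :=
  (Nat.find_spec (pvFreeExists f0 seen start)).1

lemma pvLeast_free (f0 seen start) : pvCand f0 (pvLeast f0 seen start) ∉ seen :=
  (Nat.find_spec (pvFreeExists f0 seen start)).2

lemma pvLeast_le (f0 seen start c) (h1 : start ≤ c) (h2 : pvCand f0 c ∉ seen) :
    pvLeast f0 seen start ≤ c :=
  Nat.find_le ⟨h1, h2⟩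

lemma pvLeast_mem (f0 seen start c) (h1 : start ≤ c) (h2 : c < pvLeast f0 seen start) :
    pvCand f0 c ∈ seen := by
  have := Nat.find_min (pvFreeExists f0 seen start) h2
  by_contra hx
  exact this ⟨h1, hx⟩

lemma pvLeast_eq_self (f0 seen start) (h : pvCand f0 start ∉ seen) :
    pvLeast f0 seen start = start :=
  le_antisymm (pvLeast_le _ _ _ _ le_rfl h) (pvLeast_ge _ _ _)

lemma pvLeast_succ (f0 seen start) (h : pvCand f0 start ∈ seen) :
    pvLeast f0 seen start = pvLeast f0 seen (start + 1) := by
  apply le_antisymm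
  · exact pvLeast_le _ _ _ _ (by have := pvLeast_ge f0 seen (start + 1); omega)
      (pvLeast_free f0 seen (start + 1))
  · apply pvLeast_le
    · have h1 := pvLeast_ge f0 seen start
      rcases Nat.eq_or_lt_of_le h1 with h2 | h2
      · exfalso; exact (pvLeast_free f0 seen start) (h2 ▸ h)
      · omega
    · exact pvLeast_free f0 seen start

lemma pvLeast_shift (f0 seen a b) (hab : a ≤ b)
    (h : ∀ i, a ≤ i → i < b → pvCand f0 i ∈ seen) :
    pvLeast f0 seen a = pvLeast f0 seen b := by
  induction b with
  | zero => have : a = 0 := by omega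
            rw [this]
  | succ b ih =>
    rcases Nat.eq_or_lt_of_le hab with h1 | h1
    · rw [h1]
    · have hb : a ≤ b := by omega
      rw [ih hb (fun i hi1 hi2 => h i hi1 (by omega)), pvLeast_succ]
      exact h b (by omega) (by omega)

lemma pvCand_num (f0 : String) (q : Nat) (h : 1 ≤ q) :
    pvCand f0 (25 + q) = f0 ++ PySem.Int.toStr (q : Int) := by
  rw [pvCand, if_neg (by omega)]
  congr 2
  push_cast
  ring

lemma pvALoop_eq (f0 : String) (seen : PySem.Set String) :
    ∀ (fuel c : Nat), 1 ≤ c → pvLeast f0 seen c < c + fuel →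
    pvALoop f0 seen fuel (pvCand f0 c) c = pvCand f0 (pvLeast f0 seen c) := by
  intro fuel
  induction fuel with
  | zero =>
    intro c hc hlt
    have := pvLeast_ge f0 seen c
    omega
  | succ fuel ih =>
    intro c hc hlt
    by_cases hmem : pvCand f0 c ∈ seen
    · have hb : PySem.Set.contains seen (pvCand f0 c) = true := (PySem.Set.contains_iff _ _).mpr hmem
      simp only [pvALoop, hb, if_true]
      have hcand : (if c + 1 < 26 then String.ofList [Char.ofNat (97 + (c + 1))]
          else f0 ++ PySem.Int.toStr (((c + 1 : Nat) : Int) - 25)) = pvCand f0 (c + 1) := rfl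
      rw [hcand, pvLeast_succ f0 seen c hmem]
      exact ih (c + 1) (by omega) (by rw [← pvLeast_succ f0 seen c hmem]; omega)
    · have hb : PySem.Set.contains seen (pvCand f0 c) = false := by
        simp [hmem]
      simp only [pvALoop, hb, if_false, Bool.false_eq_true]
      rw [pvLeast_eq_self f0 seen c hmem]

lemma pvALoop_not_mem (f0 : String) (seen : PySem.Set String) (fuel : Nat) (abbr : String)
    (c : Nat) (h : abbr ∉ seen) (hf : fuel ≠ 0) : pvALoop f0 seen fuel abbr c = abbr := by
  cases fuel with
  | zero => omega
  | succ fuel =>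
    simp only [pvALoop]
    rw [if_neg]
    simp [h]

lemma pvBLetter_spec (seen : PySem.Set String) (p : Nat) (hp : p ≤ 26) :
    p ≤ pvBLetter seen p ∧ pvBLetter seen p ≤ 26 ∧
    (∀ i, p ≤ i → i < pvBLetter seen p → String.ofList [Char.ofNat (97 + i)] ∈ seen) ∧
    (pvBLetter seen p < 26 → String.ofList [Char.ofNat (97 + pvBLetter seen p)] ∉ seen) := by
  suffices H : ∀ k p, 26 - p ≤ k → p ≤ 26 →
      p ≤ pvBLetter seen p ∧ pvBLetter seen p ≤ 26 ∧
      (∀ i, p ≤ i → i < pvBLetter seen p → String.ofList [Char.ofNat (97 + i)] ∈ seen) ∧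
      (pvBLetter seen p < 26 → String.ofList [Char.ofNat (97 + pvBLetter seen p)] ∉ seen) by
    exact H 26 p (by omega) hp
  intro k
  induction k with
  | zero =>
    intro p h1 h2
    have hp26 : p = 26 := by omega
    subst hp26
    rw [pvBLetter, if_neg (by omega)]
    exact ⟨le_rfl, le_rfl, fun i hi1 hi2 => by omega, fun h => by omega⟩
  | succ k ihk =>
    intro p h1 h2
    rw [pvBLetter]
    by_cases h26 : p < 26
    · rw [if_pos h26]
      by_cases hm : String.ofList [Char.ofNat (97 + p)] ∈ seen
      · have hb : PySem.Set.contains seen (String.ofList [Char.ofNat (97 + p)]) = true :=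
          (PySem.Set.contains_iff _ _).mpr hm
        rw [hb, if_pos rfl]
        obtain ⟨i1, i2, i3, i4⟩ := ihk (p + 1) (by omega) (by omega)
        refine ⟨by omega, i2, ?_, i4⟩
        intro i hh1 hh2
        rcases Nat.eq_or_lt_of_le hh1 with h3 | h3
        · exact h3 ▸ hm
        · exact i3 i (by omega) hh2
      · have hb : PySem.Set.contains seen (String.ofList [Char.ofNat (97 + p)]) = false := by
          simp [hm]
        rw [hb]
        simp only [Bool.false_eq_true, if_false]
        exact ⟨le_rfl, by omega, fun i hh1 hh2 => by omega, fun _ => hm⟩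
    · rw [if_neg h26]
      exact ⟨le_rfl, h2, fun i hh1 hh2 => by omega, fun h => by omega⟩

lemma pvBNum_eq (f0 : String) (seen : PySem.Set String) :
    ∀ (fuel q : Nat), 1 ≤ q → pvLeast f0 seen (25 + q) < 25 + q + fuel →
    pvBNum f0 seen fuel q = pvLeast f0 seen (25 + q) - 25 := by
  intro fuel
  induction fuel with
  | zero =>
    intro q hq hlt
    have := pvLeast_ge f0 seen (25 + q)
    omega
  | succ fuel ih =>
    intro q hq hlt
    have hcand : pvCand f0 (25 + q) = f0 ++ PySem.Int.toStr (q : Int) := pvCand_num f0 q hq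
    by_cases hmem : f0 ++ PySem.Int.toStr (q : Int) ∈ seen
    · have hb : PySem.Set.contains seen (f0 ++ PySem.Int.toStr (q : Int)) = true :=
        (PySem.Set.contains_iff _ _).mpr hmem
      simp only [pvBNum, hb, if_true]
      have hstep : pvLeast f0 seen (25 + q) = pvLeast f0 seen (25 + (q + 1)) :=
        pvLeast_succ f0 seen (25 + q) (hcand ▸ hmem)
      rw [ih (q + 1) (by omega) (by rw [← hstep]; omega), hstep]
    · have hb : PySem.Set.contains seen (f0 ++ PySem.Int.toStr (q : Int)) = false := by
        simp [hmem]
      simp only [pvBNum, hb, Bool.false_eq_true, if_false]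
      rw [pvLeast_eq_self f0 seen (25 + q) (hcand ▸ hmem)]
      omega

-- relation between the two fold states
def pvInv (st : PySem.Dict String String × PySem.Set String × Nat × PySem.Dict String Nat) : Prop :=
  (1 ≤ st.2.2.1 ∧ st.2.2.1 ≤ 26 ∧
    (∀ i, 1 ≤ i → i < st.2.2.1 → String.ofList [Char.ofNat (97 + i)] ∈ st.2.1)) ∧
  (∀ f q, PySem.Dict.get? st.2.2.2 f = some q →
    1 ≤ q ∧ ∀ k, 1 ≤ k → k < q → (f ++ PySem.Int.toStr (k : Int)) ∈ st.2.1)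

def pvRel (a : PySem.Dict String String × PySem.Set String)
    (b : PySem.Dict String String × PySem.Set String × Nat × PySem.Dict String Nat) : Prop :=
  a.1 = b.1 ∧ a.2 = b.2.1 ∧ pvInv b

lemma pvInv_mk (A : PySem.Dict String String) (S : PySem.Set String) (p : Nat)
    (n : PySem.Dict String Nat)
    (h1 : 1 ≤ p) (h2 : p ≤ 26)
    (h3 : ∀ i, 1 ≤ i → i < p → String.ofList [Char.ofNat (97 + i)] ∈ S)
    (h4 : ∀ f q, PySem.Dict.get? n f = some q →
      1 ≤ q ∧ ∀ k, 1 ≤ k → k < q → (f ++ PySem.Int.toStr (k : Int)) ∈ S) :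
    pvInv (A, S, p, n) := ⟨⟨h1, h2, h3⟩, h4⟩

lemma pvStep_rel (a : PySem.Dict String String × PySem.Set String)
    (b : PySem.Dict String String × PySem.Set String × Nat × PySem.Dict String Nat)
    (kv : String × List Int) (h : pvRel a b) : pvRel (pvStepA a kv) (pvStepB b kv) := by
  obtain ⟨a1, a2⟩ := a
  obtain ⟨b1, b2, b3, b4⟩ := b
  obtain ⟨h1, h2, ⟨hp1, hp2, hpmem⟩, hnum⟩ := h
  simp only at h1 h2 hp1 hp2 hpmem hnum
  subst h1
  subst h2
  cases hkv : kv.1.toList with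
  | nil =>
    simp only [pvStepA, pvStepB, hkv]
    exact ⟨rfl, rfl, ⟨hp1, hp2, hpmem⟩, hnum⟩
  | cons c rest =>
    simp only [pvStepA, pvStepB, hkv]
    set f0 : String := PySem.Str.lower (String.ofList [c]) with hf0
    have hE10 : 1 ≤ 10 ^ (pvMaxLen a2 + 1) := Nat.one_le_pow _ _ (by omega)
    by_cases hmem : f0 ∈ a2
    · -- the first candidate is taken: both sides probe
      have hcont : PySem.Set.contains a2 f0 = true := (PySem.Set.contains_iff _ _).mpr hmem
      -- A's loop finds the least free candidate index ≥ 1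
      have haA : pvALoop f0 a2 (26 + 10 ^ (pvMaxLen a2 + 1)) f0 0 = pvCand f0 (pvLeast f0 a2 1) := by
        rw [show 26 + 10 ^ (pvMaxLen a2 + 1) = (25 + 10 ^ (pvMaxLen a2 + 1)) + 1 from by omega]
        simp only [pvALoop, hcont, if_true]
        have hle : pvLeast f0 a2 1 ≤ 25 + 10 ^ (pvMaxLen a2 + 1) :=
          pvLeast_le _ _ _ _ (by omega) (pvBigFree f0 a2 _ (by omega) (by omega))
        exact pvALoop_eq f0 a2 (25 + 10 ^ (pvMaxLen a2 + 1)) 1 le_rfl (by omega)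
      obtain ⟨s1, s2, s3, s4⟩ := pvBLetter_spec a2 b3 hp2
      by_cases hlt : pvBLetter a2 b3 < 26
      · -- a free letter exists; it is exactly the least free candidate
        have hbelow : ∀ i, 1 ≤ i → i < pvBLetter a2 b3 →
            String.ofList [Char.ofNat (97 + i)] ∈ a2 := by
          intro i hi1 hi2
          by_cases hib : i < b3
          · exact hpmem i hi1 hib
          · exact s3 i (by omega) hi2
        have hEq : pvLeast f0 a2 1 = pvBLetter a2 b3 := by
          apply le_antisymm
          · exact pvLeast_le _ _ _ _ (by omega) (by rw [pvCand, if_pos hlt]; exact s4 hlt)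
          · by_contra hcon
            rw [Nat.not_le] at hcon
            have hge := pvLeast_ge f0 a2 1
            have := pvLeast_free f0 a2 1
            rw [pvCand, if_pos (by omega)] at this
            exact this (hbelow _ (by omega) (by omega))
        have hcl : pvCand f0 (pvBLetter a2 b3) =
            String.ofList [Char.ofNat (97 + pvBLetter a2 b3)] := by
          rw [pvCand, if_pos hlt]
        rw [hcont, if_pos rfl, if_pos hlt, haA, hEq, hcl]
        refine ⟨rfl, rfl, pvInv_mk _ _ _ _ (by omega) s2 ?_ ?_⟩
        · intro i hi1 hi2
          exact (PySem.Set.mem_add _ _ _).mpr (Or.inl (hbelow i hi1 hi2))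
        · intro f q hq
          obtain ⟨hq1, hq2⟩ := hnum f q hq
          exact ⟨hq1, fun k hk1 hk2 =>
            (PySem.Set.mem_add _ _ _).mpr (Or.inl (hq2 k hk1 hk2))⟩
      · -- all of 'b'..'z' is taken: both sides land in the numeric suffixes
        have hp26 : pvBLetter a2 b3 = 26 := by omega
        have hall : ∀ i, 1 ≤ i → i < 26 → String.ofList [Char.ofNat (97 + i)] ∈ a2 := by
          intro i hi1 hi2
          by_cases hib : i < b3
          · exact hpmem i hi1 hib
          · exact s3 i (by omega) (by omega)
        generalize hqdef : PySem.Dict.getD b4 f0 1 = q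
        have hqfacts : 1 ≤ q ∧ ∀ k, 1 ≤ k → k < q → (f0 ++ PySem.Int.toStr (k : Int)) ∈ a2 := by
          rw [← hqdef, PySem.Dict.getD_eq_get?_getD]
          cases hg : PySem.Dict.get? b4 f0 with
          | none =>
            simp only [Option.getD_none]
            exact ⟨le_rfl, fun k hk1 hk2 => by omega⟩
          | some v =>
            simp only [Option.getD_some]
            exact hnum f0 v hg
        obtain ⟨hq1, hqmem⟩ := hqfacts
        have hleast_le : pvLeast f0 a2 (25 + q) ≤ 25 + q + 10 ^ (pvMaxLen a2 + 1) :=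
          pvLeast_le _ _ _ _ (by omega) (pvBigFree f0 a2 _ (by omega) (by omega))
        have hk0 : pvBNum f0 a2 (10 ^ (pvMaxLen a2 + 1) + 1) q = pvLeast f0 a2 (25 + q) - 25 :=
          pvBNum_eq f0 a2 (10 ^ (pvMaxLen a2 + 1) + 1) q hq1 (by omega)
        have hgeq := pvLeast_ge f0 a2 (25 + q)
        have hchain1 : pvLeast f0 a2 1 = pvLeast f0 a2 26 := by
          apply pvLeast_shift f0 a2 1 26 (by omega)
          intro i hi1 hi2
          rw [pvCand, if_pos hi2]
          exact hall i hi1 hi2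
        have hchain2 : pvLeast f0 a2 26 = pvLeast f0 a2 (25 + q) := by
          apply pvLeast_shift f0 a2 26 (25 + q) (by omega)
          intro i hi1 hi2
          rw [show i = 25 + (i - 25) from by omega, pvCand_num f0 (i - 25) (by omega)]
          exact hqmem (i - 25) (by omega) (by omega)
        have habbrB : f0 ++ PySem.Int.toStr ((pvBNum f0 a2 (10 ^ (pvMaxLen a2 + 1) + 1) q : Nat) : Int) =
            pvCand f0 (pvLeast f0 a2 1) := by
          rw [hk0, ← pvCand_num f0 (pvLeast f0 a2 (25 + q) - 25) (by omega),
            show 25 + (pvLeast f0 a2 (25 + q) - 25) = pvLeast f0 a2 (25 + q) from by omega,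
            hchain1, hchain2]
        rw [hcont, if_pos rfl, if_neg hlt, haA, ← habbrB]
        refine ⟨rfl, rfl, pvInv_mk _ _ _ _ (by omega) (by omega) ?_ ?_⟩
        · intro i hi1 hi2
          exact (PySem.Set.mem_add _ _ _).mpr (Or.inl (hall i hi1 (by omega)))
        · intro f q' hq'
          by_cases hf : f = f0
          · subst hf
            rw [PySem.Dict.get?_insert_self] at hq'
            obtain rfl : q' = pvBNum f0 a2 (10 ^ (pvMaxLen a2 + 1) + 1) q + 1 := by
              injection hq' with hq''
              omega
            refine ⟨by omega, ?_⟩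
            intro k hk1 hk2
            rcases Nat.lt_or_ge k q with hkq | hkq
            · exact (PySem.Set.mem_add _ _ _).mpr (Or.inl (hqmem k hk1 hkq))
            · rcases Nat.lt_or_ge k (pvBNum f0 a2 (10 ^ (pvMaxLen a2 + 1) + 1) q) with hkk | hkk
              · have hm := pvLeast_mem f0 a2 (25 + q) (25 + k) (by omega) (by omega)
                rw [pvCand_num f0 k hk1] at hm
                exact (PySem.Set.mem_add _ _ _).mpr (Or.inl hm)
              · obtain rfl : k = pvBNum f0 a2 (10 ^ (pvMaxLen a2 + 1) + 1) q := by omega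
                exact (PySem.Set.mem_add _ _ _).mpr (Or.inr rfl)
          · rw [PySem.Dict.get?_insert_of_ne _ _ hf] at hq'
            obtain ⟨hq1', hq2'⟩ := hnum f q' hq'
            exact ⟨hq1', fun k hk1 hk2 =>
              (PySem.Set.mem_add _ _ _).mpr (Or.inl (hq2' k hk1 hk2))⟩
    · -- the lowered first character itself is free: both sides take it directly
      have hcont : PySem.Set.contains a2 f0 = false := by
        simp [hmem]
      have haA : pvALoop f0 a2 (26 + 10 ^ (pvMaxLen a2 + 1)) f0 0 = f0 :=
        pvALoop_not_mem f0 a2 _ f0 0 hmem (by omega)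
      rw [hcont, haA]
      simp only [Bool.false_eq_true, if_false]
      refine ⟨rfl, rfl, pvInv_mk _ _ _ _ hp1 hp2 ?_ ?_⟩
      · intro i hi1 hi2
        exact (PySem.Set.mem_add _ _ _).mpr (Or.inl (hpmem i hi1 hi2))
      · intro f q hq
        obtain ⟨hq1, hq2⟩ := hnum f q hq
        exact ⟨hq1, fun k hk1 hk2 =>
          (PySem.Set.mem_add _ _ _).mpr (Or.inl (hq2 k hk1 hk2))⟩

lemma pvFold_rel (l : List (String × List Int))
    (a : PySem.Dict String String × PySem.Set String)
    (b : PySem.Dict String String × PySem.Set String × Nat × PySem.Dict String Nat)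
    (h : pvRel a b) : pvRel (l.foldl pvStepA a) (l.foldl pvStepB b) := by
  induction l generalizing a b with
  | nil => exact h
  | cons kv t ih => exact ih _ _ (pvStep_rel _ _ _ h)

-- ===== VERDICT (by name: the statement is the Claim_ definition above) =====
theorem generate_field_abbreviations_spec : Claim_equal_generate_field_abbreviations := by
  intro data_dict _
  unfold Spec_generate_field_abbreviations generate_field_abbreviations generate_field_abbreviations_alt
  have h := pvFold_rel data_dict (PySem.Dict.empty, PySem.Set.empty)
      (PySem.Dict.empty, PySem.Set.empty, 1, PySem.Dict.empty) ?_
  · rw [h.1]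
  · refine ⟨rfl, rfl, ⟨le_rfl, by norm_num, ?_⟩, ?_⟩
    · intro i h1 h2
      have h3 : (PySem.Dict.empty (κ := String) (ν := String), PySem.Set.empty (α := String), 1,
          PySem.Dict.empty (κ := String) (ν := Nat)).2.2.1 = 1 := rfl
      rw [h3] at h2
      omega
    · intro f q hq
      rw [show (PySem.Dict.empty (κ := String) (ν := String), PySem.Set.empty (α := String), 1,
          PySem.Dict.empty (κ := String) (ν := Nat)).2.2.2 = PySem.Dict.empty from rfl,
        PySem.Dict.get?_empty] at hq
      cases hq
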